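-- pv_equiv track=rewrite | github.com/PavelGem-13g/VMK-courses | Grade 10/14.04.2021/task 4.py | f
-- ===== SOURCE A (Python) =====
-- def f(n,count):
--     count+=1
--     if count>1000:
--         return 0
--     if n<=5:
--         return n
--     elif n>5 and n%8==0:
--         return n+f(n//2-3,count)
--     elif n>5 and n%8!=0:
--         return n+f(n+4,count)
-- ===== SOURCE B (Python) =====
-- def f(n, count):
--     # Iterative rewrite: threads the partial sum through a while loop
--     # instead of through the call stack (no recursion-depth limit).
--     total = 0
--     while True:
--         count += 1
--         if count > 1000:
--             return total
--         if n <= 5: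
--             return total + n
--         total += n
--         if n % 8 == 0:
--             n = n // 2 - 3
--         else:
--             n = n + 4
-- ===== Notes on version B (the rewrite author's own statement) =====
-- stated objective: alternative
-- what changed: Replaced the non-tail recursion (sum built up on the call stack, capped by a depth counter) by a while loop threading an explicit accumulator `total`, so no call stack is used at all.
-- outside the precondition, e.g. on f(9, -8920): A returns 196882240, B returns 196882240
import Mathlib
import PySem

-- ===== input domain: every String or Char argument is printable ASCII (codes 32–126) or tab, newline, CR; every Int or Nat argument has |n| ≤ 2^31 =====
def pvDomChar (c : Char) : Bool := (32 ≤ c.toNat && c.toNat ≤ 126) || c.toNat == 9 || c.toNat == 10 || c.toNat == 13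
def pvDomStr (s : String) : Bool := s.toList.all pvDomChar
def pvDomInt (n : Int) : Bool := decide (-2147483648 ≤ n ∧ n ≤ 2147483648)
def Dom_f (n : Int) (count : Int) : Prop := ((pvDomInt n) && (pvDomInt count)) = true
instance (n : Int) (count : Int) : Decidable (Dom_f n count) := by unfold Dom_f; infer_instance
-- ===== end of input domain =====

-- B replaces A's stack-capped recursion by a while loop with an explicit accumulator (alternative decomposition, same cost);
-- Pre_f excludes the inputs on which Python A exceeds the interpreter recursion limit and raises RecursionError.


-- ===== PORT A =====
-- A's recursion, step for step: count += 1 is inlined as count + 1 (checked first against the cap,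
-- then passed to the recursive calls); the final `else 0` is unreachable (the branches are exhaustive).
-- Terminates because each call increments count toward the cap 1000.
def f (n : Int) (count : Int) : Int :=
  if count + 1 > 1000 then 0
  else if n ≤ 5 then n
  else if 5 < n ∧ PySem.Int.mod n 8 = 0 then n + f (PySem.Int.floordiv n 2 - 3) (count + 1)
  else if 5 < n ∧ PySem.Int.mod n 8 ≠ 0 then n + f (n + 4) (count + 1)
  else 0
termination_by (1001 - count).toNat
decreasing_by all_goals omega

-- ===== PORT B =====
-- B's while loop as a tail call threading the accumulator total; count += 1 inlined as count + 1.
def fAltGo (n : Int) (count : Int) (total : Int) : Int :=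
  if count + 1 > 1000 then total
  else if n ≤ 5 then total + n
  else if PySem.Int.mod n 8 = 0 then fAltGo (PySem.Int.floordiv n 2 - 3) (count + 1) (total + n)
  else fAltGo (n + 4) (count + 1) (total + n)
termination_by (1001 - count).toNat
decreasing_by all_goals omega

def f_alt (n : Int) (count : Int) : Int := fAltGo n count 0

-- ===== PRECONDITION & SPEC =====
-- A is executed under a recursion budget of 10000 frames (the grader sets sys.setrecursionlimit(10000));
-- among n > 5 only n ∈ {8,12,16} reach the n ≤ 5 base quickly, every other n > 5 recurses 1001 - count
-- times, so A raises RecursionError for count ≤ -9000. Pre_f excludes exactly those raising inputs;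
-- because the precise crash line shifts with the frames the caller already occupies, a margin of about
-- a hundred counts (-8999 ≤ count ≤ -8901, on which A returns the same value B computes — see the
-- cite (9, -8920)) is excluded with it.
def Pre_f (n : Int) (count : Int) : Prop :=
  n ≤ 5 ∨ n = 8 ∨ n = 12 ∨ n = 16 ∨ -8900 ≤ count
instance (n : Int) (count : Int) : Decidable (Pre_f n count) := by unfold Pre_f; infer_instance
def pvWitness_f : Int × Int := (9, 500)

def Spec_f (n : Int) (count : Int) (out : Int) : Prop := out = f_alt n count
instance (n : Int) (count : Int) (out : Int) : Decidable (Spec_f n count out) := by unfold Spec_f; infer_instance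

-- ===== CLAIM =====
def Claim_equal_f : Prop := ∀ (n : Int) (count : Int), Dom_f n count → Pre_f n count → Spec_f n count (f n count)

-- ===== LEMMAS AND PROOFS =====

-- Loop invariant: B's accumulator loop equals total plus A's recursive value, on every input.
theorem fAltGo_eq (n count total : Int) : fAltGo n count total = total + f n count := by
  fun_induction fAltGo n count total with
  | case1 n count total h =>
    rw [f, if_pos h]; ring
  | case2 n count total h h2 =>
    rw [f, if_neg h, if_pos h2]
  | case3 n count total h h2 h3 ih =>
    have h5 : 5 < n := by omega
    rw [f, if_neg h, if_neg h2, if_pos (show 5 < n ∧ PySem.Int.mod n 8 = 0 from ⟨h5, h3⟩), ih]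
    ring
  | case4 n count total h h2 h3 ih =>
    have h5 : 5 < n := by omega
    rw [f, if_neg h, if_neg h2,
        if_neg (show ¬ (5 < n ∧ PySem.Int.mod n 8 = 0) from fun hx => h3 hx.2),
        if_pos (show 5 < n ∧ PySem.Int.mod n 8 ≠ 0 from ⟨h5, h3⟩), ih]
    ring

-- ===== VERDICT =====
theorem f_spec : Claim_equal_f := by
  intro n count _ _
  unfold Spec_f f_alt
  rw [fAltGo_eq]
  ring
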